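-- pv_equiv track=rewrite | github.com/BoarIncorporated/Fish-solver | src/arkose_session/challenge.py | sort_headers
-- ===== SOURCE A (Python) =====
-- from typing import Dict, Optional, Tuple, Any
--
-- def sort_headers(headers: Dict[str, str]) -> Dict[str, str]:
--     header_order = [
--         ":authority",
--         ":method",
--         ":path",
--         ":scheme",
--         "accept",
--         "accept-encoding",
--         "accept-language",
--         "connection",
--         "cache-control",
--         "content-length",
--         "content-type",
--         "cookie",
--         "host",
--         "origin",
--         "pragma",
--         "priority",
--         "referer",
--         "sec-fetch-dest",
--         "sec-fetch-mode",
--         "sec-fetch-site",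
--         "user-agent",
--         "x-ark-esync-value"
--     ]
--     return {k: v for k, v in sorted(headers.items(), key=lambda item: header_order.index(item[0]) if item[0] in header_order else len(header_order))}
-- ===== SOURCE B (Python) =====
-- def sort_headers(headers):
--     header_order = [
--         ":authority",
--         ":method",
--         ":path",
--         ":scheme",
--         "accept",
--         "accept-encoding",
--         "accept-language",
--         "connection",
--         "cache-control",
--         "content-length",
--         "content-type",
--         "cookie",
--         "host",
--         "origin",
--         "pragma",
--         "priority",
--         "referer",
--         "sec-fetch-dest",
--         "sec-fetch-mode",
--         "sec-fetch-site",
--         "user-agent",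
--         "x-ark-esync-value"
--     ]
--     out = {}
--     for name in header_order:
--         if name in headers:
--             out[name] = headers[name]
--     known = set(header_order)
--     for k, v in headers.items():
--         if k not in known:
--             out[k] = v
--     return out
-- ===== Notes on version B (the rewrite author's own statement) =====
-- stated objective: alternative
-- what changed: Replaces the comparison sort keyed by list.index with a two-pass assembly: one pass over the fixed priority list picking present headers in priority order, then one pass over the original dict appending unknown headers in insertion order.
import Mathlib
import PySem

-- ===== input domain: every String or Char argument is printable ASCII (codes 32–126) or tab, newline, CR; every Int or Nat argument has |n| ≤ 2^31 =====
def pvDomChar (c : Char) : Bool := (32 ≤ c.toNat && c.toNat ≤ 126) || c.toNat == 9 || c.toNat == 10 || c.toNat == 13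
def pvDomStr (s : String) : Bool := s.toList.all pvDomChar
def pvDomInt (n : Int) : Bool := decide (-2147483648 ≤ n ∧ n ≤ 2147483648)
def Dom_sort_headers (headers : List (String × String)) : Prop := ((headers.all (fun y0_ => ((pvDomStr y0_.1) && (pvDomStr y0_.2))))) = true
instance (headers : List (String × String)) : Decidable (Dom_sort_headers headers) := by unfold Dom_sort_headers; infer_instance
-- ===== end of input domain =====

-- B replaces A's stable sort keyed by list.index with a two-pass assembly (priority pass, then leftover pass); same return value, no speed claim.

-- ===== PORT A =====
def pvHeaderOrder : List String := [
  ":authority", ":method", ":path", ":scheme", "accept", "accept-encoding",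
  "accept-language", "connection", "cache-control", "content-length",
  "content-type", "cookie", "host", "origin", "pragma", "priority",
  "referer", "sec-fetch-dest", "sec-fetch-mode", "sec-fetch-site",
  "user-agent", "x-ark-esync-value"]

def pvKey (item : String × String) : Nat :=
  if pvHeaderOrder.contains item.1 then (PySem.List.index? pvHeaderOrder item.1).getD 0
  else pvHeaderOrder.length

def sort_headers (headers : List (String × String)) : List (String × String) :=
  ((PySem.List.sorted headers pvKey).foldl
      (fun d p => d.insert p.1 p.2) (PySem.Dict.empty : PySem.Dict String String)).items


-- ===== PORT B =====
def sort_headers_alt (headers : List (String × String)) : List (String × String) :=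
  let h : PySem.Dict String String := PySem.Dict.mk headers
  let d1 := pvHeaderOrder.foldl
    (fun d name =>
      match h.get? name with
      | some v => d.insert name v
      | none => d) (PySem.Dict.empty : PySem.Dict String String)
  let known : PySem.Set String := PySem.Set.ofList pvHeaderOrder
  let d2 := headers.foldl
    (fun d p => if !(PySem.Set.contains known p.1) then d.insert p.1 p.2 else d) d1
  d2.items


-- ===== PRECONDITION & SPEC =====
-- Pre_ excludes association lists with duplicate keys: A's argument is a Python dict, whose
-- keys are unique, so such lists never arise from a real call and behaviour there is unspecified.
def Pre_sort_headers (headers : List (String × String)) : Prop :=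
  (headers.map Prod.fst).Nodup
instance (headers : List (String × String)) : Decidable (Pre_sort_headers headers) := by
  unfold Pre_sort_headers; infer_instance

def pvWitness_sort_headers : (List (String × String)) :=
  [("cookie", "a=1"), ("zzz", "9"), (":method", "GET")]

def Spec_sort_headers (headers : List (String × String)) (out : List (String × String)) : Prop := out = sort_headers_alt headers
instance (headers : List (String × String)) (out : List (String × String)) : Decidable (Spec_sort_headers headers out) := by unfold Spec_sort_headers; infer_instance

-- ===== CLAIM (what is proved, stated in full; the proofs are below) =====
def Claim_equal_sort_headers : Prop := ∀ (headers : List (String × String)), Dom_sort_headers headers → Pre_sort_headers headers → Spec_sort_headers headers (sort_headers headers)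

-- ===== LEMMAS AND PROOFS =====

lemma pv_insertBy_append {α : Type} (before : α → α → Bool) (a : α) (l1 l2 : List α)
    (h : ∀ x ∈ l2, before a x = true) :
    PySem.List.insertBy before a (l1 ++ l2) = PySem.List.insertBy before a l1 ++ l2 := by
  induction l1 with
  | nil =>
    cases l2 with
    | nil => rfl
    | cons y ys =>
      simp [PySem.List.insertBy, h y (by simp)]
  | cons z zs ih =>
    simp only [List.cons_append, PySem.List.insertBy]
    by_cases hz : before a z = true
    · simp [hz]
    · simp only [Bool.not_eq_true] at hz
      simp [hz, ih]

lemma pv_sorted_split {α : Type} (key : α → Nat) (N : Nat) (xs : List α)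
    (hle : ∀ x ∈ xs, key x ≤ N) :
    PySem.List.sorted xs key =
      PySem.List.sorted (xs.filter (fun x => decide (key x < N))) key
        ++ xs.filter (fun x => key x == N) := by
  induction xs using List.reverseRecOn with
  | nil => simp [PySem.List.sorted_eq_foldl_insertBy]
  | append_singleton xs a ih =>
    have hle' : ∀ x ∈ xs, key x ≤ N := fun x hx => hle x (by simp [hx])
    have hstep : ∀ (l : List α), PySem.List.sorted (l ++ [a]) key =
        PySem.List.insertBy (fun u v => decide (key u < key v)) a (PySem.List.sorted l key) := by
      intro l
      rw [PySem.List.sorted_eq_foldl_insertBy, PySem.List.sorted_eq_foldl_insertBy,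
        List.foldl_append]
      rfl
    by_cases ha : key a < N
    · have hE : ∀ x ∈ xs.filter (fun x => key x == N), (fun u v => decide (key u < key v)) a x = true := by
        intro x hx
        have := List.of_mem_filter hx
        simp only [beq_iff_eq] at this
        simp [this, ha]
      rw [hstep, ih hle', pv_insertBy_append _ _ _ _ hE, ← hstep]
      simp [List.filter_append, ha, Nat.ne_of_lt ha]
    · have haN : key a = N := Nat.le_antisymm (hle a (by simp)) (Nat.le_of_not_lt ha)
      have hall : ∀ y ∈ PySem.List.sorted (xs.filter (fun x => decide (key x < N))) key
          ++ xs.filter (fun x => key x == N), (fun u v => decide (key u < key v)) a y = false := by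
        intro y hy
        rcases List.mem_append.mp hy with hy | hy
        · have := List.of_mem_filter ((PySem.List.mem_sorted _ _ _ _).mp hy)
          simp only [decide_eq_true_eq] at this
          simp [haN]; omega
        · have := List.of_mem_filter hy
          simp only [beq_iff_eq] at this
          simp [haN, this]
      rw [hstep, ih hle', PySem.List.insertBy_of_forall_not_before _ _ _ hall]
      simp [List.filter_append, haN]

lemma pv_order_nodup : pvHeaderOrder.Nodup := by decide
lemma pv_idx_lt : ∀ n ∈ pvHeaderOrder,
    (List.idxOf? n pvHeaderOrder).getD 0 < pvHeaderOrder.length := by decide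
lemma pv_pairwise_idx : pvHeaderOrder.Pairwise
    (fun a b => (List.idxOf? a pvHeaderOrder).getD 0 < (List.idxOf? b pvHeaderOrder).getD 0) := by decide

lemma pvKey_lt_iff (x : String × String) :
    pvKey x < pvHeaderOrder.length ↔ x.1 ∈ pvHeaderOrder := by
  unfold pvKey
  by_cases hc : x.1 ∈ pvHeaderOrder
  · simpa [hc] using pv_idx_lt x.1 hc
  · simp [hc]

lemma pvKey_le (x : String × String) : pvKey x ≤ pvHeaderOrder.length := by
  unfold pvKey
  by_cases hc : x.1 ∈ pvHeaderOrder
  · simpa [hc] using Nat.le_of_lt (pv_idx_lt x.1 hc)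
  · simp [hc]

lemma pvKey_eq_iff (x : String × String) :
    (pvKey x == pvHeaderOrder.length) = !(pvHeaderOrder.contains x.1) := by
  by_cases hc : x.1 ∈ pvHeaderOrder
  · have := (pvKey_lt_iff x).mpr hc
    simp [hc, Nat.ne_of_lt this]
  · unfold pvKey
    simp [hc]

-- B characterization
lemma alt_items (headers : List (String × String))
    (hpre : (headers.map Prod.fst).Nodup) :
    sort_headers_alt headers =
      ((pvHeaderOrder.filter (fun n => (PySem.Dict.mk headers).contains n)).map
        (fun n => (n, (PySem.Dict.mk headers).getD n "")))
      ++ headers.filter (fun p => !(pvHeaderOrder.contains p.1)) := by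
  unfold sort_headers_alt
  set h : PySem.Dict String String := PySem.Dict.mk headers with hh
  simp only []
  have e1 : pvHeaderOrder.foldl
      (fun d name => match h.get? name with
        | some v => d.insert name v
        | none => d) (PySem.Dict.empty : PySem.Dict String String)
      = (pvHeaderOrder.filter (fun n => h.contains n)).foldl
          (fun d n => d.insert n (h.getD n "")) PySem.Dict.empty := by
    rw [PySem.List.foldl_congr_mem pvHeaderOrder _
      (fun d name => if h.contains name then d.insert name (h.getD name "") else d) _
      (by
        intro d name _
        have hc := PySem.Dict.contains_eq_isSome_get? h name
        cases hg : h.get? name <;>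
          simp [hc, hg, PySem.Dict.getD_eq_get?_getD])]
    exact PySem.List.foldl_if_eq_foldl_filter _ _ _ _
  rw [e1]
  have hfltnodup : (pvHeaderOrder.filter (fun n => h.contains n)).Nodup :=
    pv_order_nodup.filter _
  have hd1 : ((pvHeaderOrder.filter (fun n => h.contains n)).foldl
      (fun d n => d.insert n (h.getD n "")) PySem.Dict.empty).items
      = (pvHeaderOrder.filter (fun n => h.contains n)).map (fun n => (n, h.getD n "")) := by
    have := PySem.Dict.items_foldl_insert_fresh
      (pvHeaderOrder.filter (fun n => h.contains n)) (fun n => n) (fun n => h.getD n "")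
      (PySem.Dict.empty : PySem.Dict String String)
      (by intro a _; simp) (by simpa using hfltnodup)
    simpa using this
  set d1 := (pvHeaderOrder.filter (fun n => h.contains n)).foldl
      (fun d n => d.insert n (h.getD n "")) PySem.Dict.empty with hd1def
  have e2 : headers.foldl
      (fun d p => if !(PySem.Set.contains (PySem.Set.ofList pvHeaderOrder) p.1)
        then d.insert p.1 p.2 else d) d1
      = (headers.filter (fun p => !(pvHeaderOrder.contains p.1))).foldl
          (fun d p => d.insert p.1 p.2) d1 := by
    rw [PySem.List.foldl_if_eq_foldl_filter
      (fun (p : String × String) => !(PySem.Set.contains (PySem.Set.ofList pvHeaderOrder) p.1))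
      (fun (d : PySem.Dict String String) p => d.insert p.1 p.2)]
    congr 1
  rw [e2]
  have hkeys1 : d1.keys = pvHeaderOrder.filter (fun n => h.contains n) := by
    show d1.items.map Prod.fst = _
    rw [hd1]
    simp [Function.comp_def]
  have hfresh : ∀ p ∈ headers.filter (fun p => !(pvHeaderOrder.contains p.1)),
      d1.contains p.1 = false := by
    intro p hp
    have hnc := List.of_mem_filter hp
    simp only [Bool.not_eq_true'] at hnc
    have hnc' : p.1 ∉ pvHeaderOrder := by simpa using hnc
    rw [PySem.Dict.contains_eq_decide_mem_keys, hkeys1]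
    simp only [decide_eq_false_iff_not]
    exact fun hmem => hnc' (List.mem_of_mem_filter hmem)
  have hnodup2 : ((headers.filter (fun p => !(pvHeaderOrder.contains p.1))).map Prod.fst).Nodup :=
    hpre.sublist (List.filter_sublist.map Prod.fst)
  rw [PySem.Dict.items_foldl_insert_fresh _ Prod.fst Prod.snd d1 hfresh hnodup2]
  rw [hd1]
  simp

lemma a_items (headers : List (String × String))
    (hpre : (headers.map Prod.fst).Nodup) :
    sort_headers headers = PySem.List.sorted headers pvKey := by
  unfold sort_headers
  have hperm : (PySem.List.sorted headers pvKey).Perm headers :=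
    PySem.List.sorted_perm headers pvKey false
  have hnd : ((PySem.List.sorted headers pvKey).map Prod.fst).Nodup :=
    ((hperm.map Prod.fst).nodup_iff).mpr hpre
  have := PySem.Dict.items_foldl_insert_fresh
    (PySem.List.sorted headers pvKey) Prod.fst Prod.snd
    (PySem.Dict.empty : PySem.Dict String String)
    (by intro a _; simp) hnd
  simpa using this

lemma sorted_eq (headers : List (String × String))
    (hpre : (headers.map Prod.fst).Nodup) :
    PySem.List.sorted headers pvKey =
      ((pvHeaderOrder.filter (fun n => (PySem.Dict.mk headers).contains n)).map
        (fun n => (n, (PySem.Dict.mk headers).getD n "")))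
      ++ headers.filter (fun p => !(pvHeaderOrder.contains p.1)) := by
  set h : PySem.Dict String String := PySem.Dict.mk headers with hh
  have hkeys : h.keys = headers.map Prod.fst := rfl
  have hitems : h.items = headers := rfl
  have hget : ∀ k v, h.get? k = some v ↔ (k, v) ∈ headers := by
    intro k v
    rw [← hitems]
    exact PySem.Dict.get?_eq_some_iff_mem_items h k v (by rw [hkeys]; exact hpre)
  rw [pv_sorted_split pvKey pvHeaderOrder.length headers (fun x _ => pvKey_le x)]
  congr 1
  · -- sorted part equals the priority-order map
    apply PySem.List.sorted_eq_of_perm_of_pairwise_lt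
    · -- perm
      rw [List.perm_ext_iff_of_nodup]
      · intro p
        rcases p with ⟨k, v⟩
        simp only [List.mem_map, List.mem_filter, decide_eq_true_eq]
        constructor
        · rintro ⟨n, ⟨hn, hc⟩, heq⟩
          obtain ⟨rfl, rfl⟩ : n = k ∧ h.getD n "" = v := by
            exact ⟨congrArg Prod.fst heq, congrArg Prod.snd heq⟩
          have hsome : ∃ w, h.get? n = some w := by
            rw [PySem.Dict.contains_eq_isSome_get?] at hc
            exact Option.isSome_iff_exists.mp hc
          obtain ⟨w, hw⟩ := hsome
          have hvd : h.getD n "" = w := by rw [PySem.Dict.getD_eq_get?_getD, hw]; rfl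
          refine ⟨(hget n w).mp hw |> fun hm => ?_, ?_⟩
          · exact hvd ▸ hm
          · rw [pvKey_lt_iff]; exact hn
        · rintro ⟨hm, hlt⟩
          have hk : k ∈ pvHeaderOrder := (pvKey_lt_iff (k, v)).mp hlt
          have hw : h.get? k = some v := (hget k v).mpr hm
          refine ⟨k, ⟨hk, ?_⟩, ?_⟩
          · rw [PySem.Dict.contains_eq_isSome_get?, hw]; rfl
          · rw [PySem.Dict.getD_eq_get?_getD, hw]
            rfl
      · -- nodup of the map
        have : ((pvHeaderOrder.filter (fun n => h.contains n)).map
            (fun n => (n, h.getD n ""))).map Prod.fst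
            = pvHeaderOrder.filter (fun n => h.contains n) := by
          simp [Function.comp_def]
        exact List.Nodup.of_map Prod.fst (by rw [this]; exact pv_order_nodup.filter _)
      · exact hpre.sublist (List.filter_sublist.map Prod.fst) |> List.Nodup.of_map Prod.fst
    · -- pairwise strictly increasing keys
      rw [List.pairwise_map]
      have hkeyeq : ∀ n ∈ pvHeaderOrder, pvKey (n, h.getD n "") = (List.idxOf? n pvHeaderOrder).getD 0 := by
        intro n hn
        unfold pvKey
        simp [hn]
      exact (List.Pairwise.sublist List.filter_sublist pv_pairwise_idx).imp_of_mem (by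
        intro a b ha hb hlt
        rw [hkeyeq a (List.mem_of_mem_filter ha), hkeyeq b (List.mem_of_mem_filter hb)]
        exact hlt)
  · exact List.filter_congr (fun x _ => pvKey_eq_iff x)

-- ===== VERDICT (by name: the statement is the Claim_ definition above) =====
theorem sort_headers_spec : Claim_equal_sort_headers := by
  intro headers _ hpre
  unfold Spec_sort_headers
  rw [a_items headers hpre, sorted_eq headers hpre, alt_items headers hpre]
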